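-- pv_equiv track=rewrite | github.com/EvgeniiaBubenkova/webdrivercamp-lear | ning-python/python-data-srtuctures-continue/2_only_unique.py | only_unique
-- ===== SOURCE A (Python) =====
-- def only_unique(list_=[]):
--     x = set()
--     total = 0
--     for i in list_:
--         if i not in x:
--             total += i
--             x.add(i)
--     return total
-- ===== SOURCE B (Python) =====
-- def only_unique(list_=[]):
--     if not list_:
--         return 0
--     head, *tail = list_
--     return head + only_unique([x for x in tail if x != head])
-- ===== Notes on version B (the rewrite author's own statement) =====
-- stated objective: alternative
-- what changed: Replaces A's one-pass loop with a seen-set and running accumulator by a recursive divide algorithm with no auxiliary set at all: take the head, filter every later copy of it out of the tail, and recurse on what remains.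
import Mathlib
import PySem

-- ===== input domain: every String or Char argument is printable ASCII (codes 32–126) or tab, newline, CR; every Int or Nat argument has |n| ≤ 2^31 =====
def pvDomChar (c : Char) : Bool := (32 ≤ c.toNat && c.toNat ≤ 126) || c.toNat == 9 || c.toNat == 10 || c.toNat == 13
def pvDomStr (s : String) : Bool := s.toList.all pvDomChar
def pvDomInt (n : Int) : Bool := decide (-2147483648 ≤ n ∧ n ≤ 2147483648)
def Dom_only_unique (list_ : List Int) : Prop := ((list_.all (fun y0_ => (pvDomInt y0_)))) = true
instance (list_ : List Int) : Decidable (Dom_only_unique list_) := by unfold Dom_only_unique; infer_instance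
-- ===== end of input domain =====

-- B replaces A's single fused seen-set + accumulator loop with a recursive algorithm that keeps
-- no auxiliary set: add the head once, filter all its later copies out of the tail, recurse.

-- ===== PORT A =====
def only_unique (list_ : List Int) : Int :=
  (list_.foldl (fun (st : PySem.Set Int × Int) i =>
    if ¬ PySem.Set.contains st.1 i then (PySem.Set.add st.1 i, st.2 + i) else st)
    (PySem.Set.empty, 0)).2

-- ===== PORT B =====
def only_unique_alt (list_ : List Int) : Int :=
  match list_ with
  | [] => 0
  | head :: tail => head + only_unique_alt (tail.filter (fun x => x ≠ head))
termination_by list_.length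
decreasing_by
  simp only [List.length_unattach]
  exact Nat.lt_succ_of_le (le_trans (List.length_filter_le _ _) (by simp))

-- ===== PRECONDITION & SPEC =====
def Spec_only_unique (list_ : List Int) (out : Int) : Prop := out = only_unique_alt list_
instance (list_ : List Int) (out : Int) : Decidable (Spec_only_unique list_ out) := by unfold Spec_only_unique; infer_instance

-- ===== CLAIM (what is proved, stated in full; the proofs are below) =====
def Claim_equal_only_unique : Prop := ∀ (list_ : List Int), Dom_only_unique list_ → Spec_only_unique list_ (only_unique list_)

-- ===== LEMMAS AND PROOFS =====

-- the common specification: the sum of the distinct elements, as a Finset sum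
def pvDistinctSum (l : List Int) : Int := ∑ v ∈ l.toFinset, v

theorem pv_sum_append_singleton (l : List Int) (i : Int) :
    ((l ++ [i]).foldl (· + ·) (0 : Int)) = l.foldl (· + ·) 0 + i := by
  simp [List.foldl_append]

-- A's loop from state (s, t) ends with total t + sum(update s xs) - sum(s)
theorem pv_loopA (xs : List Int) (s : PySem.Set Int) (t : Int) :
    (xs.foldl (fun (st : PySem.Set Int × Int) i =>
      if ¬ PySem.Set.contains st.1 i then (PySem.Set.add st.1 i, st.2 + i) else st)
      (s, t)).2
    = t + (PySem.Set.update s xs).foldl (· + ·) 0 - s.foldl (· + ·) 0 := by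
  induction xs generalizing s t with
  | nil => simp [PySem.Set.update]
  | cons i rest ih =>
    rw [List.foldl_cons]
    by_cases h : PySem.Set.contains s i
    · have hm : i ∈ s := by simpa [PySem.Set.contains] using h
      have hadd : PySem.Set.add s i = s := by simp [PySem.Set.add, hm]
      have hstep : (if ¬ PySem.Set.contains s i = true
          then (PySem.Set.add s i, t + i) else (s, t)) = (s, t) := by simp [hm]
      rw [hstep, ih]
      simp [PySem.Set.update, List.foldl_cons, hadd]
    · have hm : i ∉ s := by simpa [PySem.Set.contains] using h
      have hadd : PySem.Set.add s i = s ++ [i] := by simp [PySem.Set.add, hm]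
      have hstep : (if ¬ PySem.Set.contains s i = true
          then (PySem.Set.add s i, t + i) else (s, t)) = (s ++ [i], t + i) := by
        simp [hm]
      rw [hstep, ih]
      simp only [PySem.Set.update, List.foldl_cons, hadd, pv_sum_append_singleton]
      ring

theorem pv_A_eq_distinctSum (l : List Int) : only_unique l = pvDistinctSum l := by
  unfold only_unique pvDistinctSum
  rw [pv_loopA]
  have h0 : PySem.Set.update PySem.Set.empty l = PySem.List.dedup l := by
    simp [PySem.Set.update_nil_left, PySem.Set.empty]
  rw [h0]
  have hnd : (PySem.List.dedup l).Nodup := PySem.List.nodup_dedup l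
  have hfs : (PySem.List.dedup l).toFinset = l.toFinset := by
    ext x; simp
  rw [← hfs, List.sum_toFinset _ hnd]
  simp [PySem.Set.empty, List.sum_eq_foldl]

theorem pv_B_rec (n : Nat) : ∀ l : List Int, l.length ≤ n → only_unique_alt l = pvDistinctSum l := by
  induction n with
  | zero =>
    intro l hl
    have : l = [] := List.eq_nil_of_length_eq_zero (Nat.le_zero.mp hl)
    subst this
    simp [only_unique_alt, pvDistinctSum]
  | succ n ih =>
    intro l hl
    match l with
    | [] => simp [only_unique_alt, pvDistinctSum]
    | head :: tail =>
    rw [only_unique_alt]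
    rw [ih _ (le_trans (List.length_filter_le _ _) (by simpa using Nat.succ_le_succ_iff.mp hl))]
    unfold pvDistinctSum
    have hfs : (tail.filter (fun x => x ≠ head)).toFinset = tail.toFinset.erase head := by
      ext x; simp [Finset.mem_erase, and_comm]
    rw [hfs]
    have : (head :: tail).toFinset = insert head (tail.toFinset.erase head) := by
      ext x; by_cases hx : x = head <;> simp [hx, Finset.mem_erase]
    rw [this, Finset.sum_insert (Finset.notMem_erase _ _)]

theorem pv_B_eq_distinctSum (l : List Int) : only_unique_alt l = pvDistinctSum l :=
  pv_B_rec l.length l le_rfl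

-- ===== VERDICT (by name: the statement is the Claim_ definition above) =====
theorem only_unique_spec : Claim_equal_only_unique := by
  intro list_ _
  unfold Spec_only_unique
  rw [pv_A_eq_distinctSum, pv_B_eq_distinctSum]
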